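-- pv_equiv track=rewrite | github.com/JDSB123/green_bier_sports_nba_model | src/utils/markets.py | _build_periods
-- ===== SOURCE A (Python) =====
-- from typing import Dict, List, Optional, Tuple
--
-- def _build_periods(markets: List[str]) -> Dict[str, List[str]]:
--     periods: Dict[str, List[str]] = {}
--     for market in markets:
--         if "_" not in market:
--             continue
--         period, market_type = market.split("_", 1)
--         periods.setdefault(period, []).append(market_type)
--
--     for key in periods:
--         periods[key] = sorted(periods[key])
--     return periods
-- ===== SOURCE B (Python) =====
-- def _build_periods(markets):
--     pairs = [m.split("_", 1) for m in markets if "_" in m]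
--     keys = dict.fromkeys(p for p, _ in pairs)
--     return {p: sorted(t for q, t in pairs if q == p) for p in keys}
-- ===== Notes on version B (the rewrite author's own statement) =====
-- stated objective: idiomatic
-- what changed: Replaces A's incremental setdefault-buckets plus a second in-place per-key sorting pass with a single dict comprehension: split once into (period, type) pairs, take first-occurrence keys via dict.fromkeys, and build each value directly as sorted of a per-key filter.
import Mathlib
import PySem

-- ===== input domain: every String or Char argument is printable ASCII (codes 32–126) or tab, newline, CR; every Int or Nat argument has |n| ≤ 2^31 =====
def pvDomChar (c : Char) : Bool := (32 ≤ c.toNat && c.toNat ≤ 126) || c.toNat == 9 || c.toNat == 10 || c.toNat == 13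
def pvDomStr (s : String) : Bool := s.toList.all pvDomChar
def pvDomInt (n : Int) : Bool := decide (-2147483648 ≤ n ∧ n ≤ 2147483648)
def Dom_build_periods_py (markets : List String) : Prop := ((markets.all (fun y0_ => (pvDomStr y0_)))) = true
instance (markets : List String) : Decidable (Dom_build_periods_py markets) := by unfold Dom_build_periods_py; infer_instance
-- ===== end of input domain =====

-- B groups via a single dict comprehension over first-occurrence keys instead of A's
-- incremental setdefault buckets plus a second in-place sorting pass (objective: idiomatic).

-- shared helper: m.split("_", 1) unpacked into (period, market_type); callers only use it when "_" in m
def pvSplit1 (m : String) : String × String :=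
  match PySem.Str.splitMax? m "_" 1 with
  | some (p :: t :: _) => (p, t)
  | _ => ("", "")

-- ===== PORT A =====
def build_periods_py (markets : List String) : List (String × List String) :=
  -- first loop: periods.setdefault(period, []).append(market_type) on markets containing "_"
  let periods : PySem.Dict String (List String) :=
    markets.foldl (fun d m =>
      if PySem.Str.isIn "_" m then
        let pt := pvSplit1 m
        d.modify pt.1 [] (fun v => v ++ [pt.2])
      else d) PySem.Dict.empty
  -- second loop: for key in periods: periods[key] = sorted(periods[key])
  let periods2 := periods.keys.foldl
      (fun d k => d.insert k (PySem.List.sorted (d.getD k []) (fun t => t))) periods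
  periods2.items

-- ===== PORT B =====
def build_periods_py_alt (markets : List String) : List (String × List String) :=
  let pairs := (markets.filter (fun m => PySem.Str.isIn "_" m)).map pvSplit1
  let keys := PySem.List.dedup (pairs.map (fun q => q.1))
  (keys.foldl (fun d p =>
      d.insert p (PySem.List.sorted ((pairs.filter (fun q => q.1 == p)).map (fun q => q.2)) (fun t => t)))
    PySem.Dict.empty).items

-- ===== PRECONDITION & SPEC =====
def Spec_build_periods_py (markets : List String) (out : List (String × List String)) : Prop := out = build_periods_py_alt markets
instance (markets : List String) (out : List (String × List String)) : Decidable (Spec_build_periods_py markets out) := by unfold Spec_build_periods_py; infer_instance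

-- ===== CLAIM (what is proved, stated in full; the proofs are below) =====
def Claim_equal_build_periods_py : Prop := ∀ (markets : List String), Dom_build_periods_py markets → Spec_build_periods_py markets (build_periods_py markets)

-- ===== LEMMAS AND PROOFS =====

-- the pair list both programs conceptually traverse
def pvPairs (markets : List String) : List (String × String) :=
  (markets.filter (fun m => PySem.Str.isIn "_" m)).map pvSplit1

-- A's first loop, rewritten as a fold over pvPairs
lemma pvA_loop1 (markets : List String) :
    markets.foldl (fun d m =>
      if PySem.Str.isIn "_" m then
        let pt := pvSplit1 m
        d.modify pt.1 [] (fun v => v ++ [pt.2])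
      else d) PySem.Dict.empty
      = (pvPairs markets).foldl (fun d p => d.modify p.1 [] (fun v => v ++ [p.2])) PySem.Dict.empty := by
  rw [pvPairs, List.foldl_map, List.foldl_filter]

lemma pvA_d1_keys (markets : List String) :
    ((pvPairs markets).foldl (fun d p => d.modify p.1 [] (fun v => v ++ [p.2]))
      (PySem.Dict.empty : PySem.Dict String (List String))).keys
      = PySem.Set.ofList ((pvPairs markets).map (fun q => q.1)) := by
  rw [PySem.Dict.keys_foldl_modify_key (pvPairs markets) (fun q => q.1) []
        (fun _ p => fun v => v ++ [p.2]) PySem.Dict.empty]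
  rfl

lemma pvA_d1_nodup (markets : List String) :
    ((pvPairs markets).foldl (fun d p => d.modify p.1 [] (fun v => v ++ [p.2]))
      (PySem.Dict.empty : PySem.Dict String (List String))).keys.Nodup := by
  rw [pvA_d1_keys]
  exact PySem.Set.nodup_ofList _

lemma pvA_d1_getD (markets : List String) (p : String) :
    ((pvPairs markets).foldl (fun d q => d.modify q.1 [] (fun v => v ++ [q.2]))
      (PySem.Dict.empty : PySem.Dict String (List String))).getD p []
      = ((pvPairs markets).filter (fun q => q.1 == p)).map (fun q => q.2) := by
  rw [PySem.Dict.getD_foldl_modify_append (pvPairs markets) PySem.Dict.empty p]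
  rfl

-- Set.update by elements already present is the identity
lemma pvSet_update_of_subset {s : PySem.Set String} {l : List String}
    (h : ∀ x ∈ l, x ∈ s) : PySem.Set.update s l = s := by
  induction l generalizing s with
  | nil => rfl
  | cons a l ih =>
      have ha : s.contains a = true := by
        simp
        exact h a (by simp)
      show PySem.Set.update (PySem.Set.add s a) l = s
      rw [PySem.Set.add, if_pos ha]
      exact ih (fun x hx => h x (by simp [hx]))

-- A's second loop: keys are unchanged
lemma pvA_loop2_keys (d : PySem.Dict String (List String)) :
    (d.keys.foldl (fun acc k => acc.insert k (PySem.List.sorted (acc.getD k []) (fun t => t))) d).keys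
      = d.keys := by
  rw [PySem.Dict.keys_foldl_insert d.keys (fun acc k => PySem.List.sorted (acc.getD k []) (fun t => t)) d]
  exact pvSet_update_of_subset (fun x hx => hx)

-- A's second loop: lookup after the loop
lemma pvA_loop2_getD (ks : List String) (hnd : ks.Nodup)
    (d : PySem.Dict String (List String)) (k : String) :
    (ks.foldl (fun acc k => acc.insert k (PySem.List.sorted (acc.getD k []) (fun t => t))) d).getD k []
      = if k ∈ ks then PySem.List.sorted (d.getD k []) (fun t => t) else d.getD k [] := by
  induction ks generalizing d with
  | nil => simp
  | cons a ks ih =>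
      simp only [List.foldl_cons]
      rw [ih (by simp_all [List.nodup_cons])]
      by_cases hk : k ∈ ks
      · have hka : k ≠ a := by rintro rfl; exact (List.nodup_cons.mp hnd).1 hk
        simp [hk, hka, PySem.Dict.getD_insert]
      · by_cases hka : k = a
        · subst hka; simp [hk]
        · simp [hk, hka, PySem.Dict.getD_insert]

-- ===== VERDICT (by name: the statement is the Claim_ definition above) =====
theorem build_periods_py_spec : Claim_equal_build_periods_py := by
  intro markets _
  show build_periods_py markets = build_periods_py_alt markets
  unfold build_periods_py build_periods_py_alt
  rw [pvA_loop1]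
  set d1 := (pvPairs markets).foldl (fun d p => d.modify p.1 [] (fun v => v ++ [p.2]))
      (PySem.Dict.empty : PySem.Dict String (List String)) with hd1
  set d2 := d1.keys.foldl (fun d k => d.insert k (PySem.List.sorted (d.getD k []) (fun t => t))) d1 with hd2
  have hnd1 : d1.keys.Nodup := pvA_d1_nodup markets
  have hkeys2 : d2.keys = d1.keys := pvA_loop2_keys d1
  have hnd2 : d2.keys.Nodup := by rw [hkeys2]; exact hnd1
  rw [PySem.Dict.items_eq_map_keys d2 hnd2 [], hkeys2]
  rw [PySem.Dict.items_foldl_insert_fresh _ (fun p => p) _ PySem.Dict.empty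
        (fun a _ => rfl) (by simp only [List.map_id']; exact PySem.Set.nodup_ofList _)]
  simp only [PySem.List.dedup, PySem.Dict.empty, List.nil_append]
  rw [pvA_d1_keys]
  refine List.map_congr_left (fun k hk => ?_)
  have hg : d2.getD k [] = PySem.List.sorted (d1.getD k []) (fun t => t) := by
    rw [hd2, pvA_loop2_getD d1.keys hnd1 d1 k, if_pos (by rw [pvA_d1_keys]; exact hk)]
  rw [hg, pvA_d1_getD]
  rfl
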